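-- pv_equiv track=rewrite | github.com/OpenBrowserAI/openbrowser | bridge/promptbuddy_service.py | _compress_preserving_code_fences
-- ===== SOURCE A (Python) =====
-- from typing import Any, Dict, List, Optional, Tuple
--
-- def _compress_plain_text(text: str) -> str:
--     return " ".join(text.split())
--
-- def _compress_preserving_code_fences(text: str) -> str:
--     chunks = text.split("```")
--     if len(chunks) == 1:
--         return _compress_plain_text(text)
--
--     rebuilt: List[str] = []
--     for idx, chunk in enumerate(chunks):
--         if idx % 2 == 0:
--             rebuilt.append(_compress_plain_text(chunk))
--         else:
--             rebuilt.append(chunk.strip("\n"))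
--     return "```".join(rebuilt).strip()
-- ===== SOURCE B (Python) =====
-- def _compress_plain_text(text: str) -> str:
--     return " ".join(text.split())
--
-- def _compress_preserving_code_fences(text: str) -> str:
--     # single forward scan: no chunk list, no enumerate/parity pass
--     out = []
--     seg = []
--     in_code = False
--     i = 0
--     n = len(text)
--     while i < n:
--         if text.startswith("```", i):
--             piece = "".join(seg)
--             out.append(piece.strip("\n") if in_code else _compress_plain_text(piece))
--             out.append("```")
--             seg = []
--             in_code = not in_code
--             i += 3
--         else:
--             seg.append(text[i])
--             i += 1
--     piece = "".join(seg)
--     out.append(piece.strip("\n") if in_code else _compress_plain_text(piece))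
--     return "".join(out).strip()
-- ===== Notes on version B (the rewrite author's own statement) =====
-- stated objective: alternative
-- what changed: Replaces split-into-chunks + enumerate-parity map + join (and the redundant len==1 special case) with a single forward scan that toggles an in_code flag at each fence and emits each compressed segment directly.
import Mathlib
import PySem

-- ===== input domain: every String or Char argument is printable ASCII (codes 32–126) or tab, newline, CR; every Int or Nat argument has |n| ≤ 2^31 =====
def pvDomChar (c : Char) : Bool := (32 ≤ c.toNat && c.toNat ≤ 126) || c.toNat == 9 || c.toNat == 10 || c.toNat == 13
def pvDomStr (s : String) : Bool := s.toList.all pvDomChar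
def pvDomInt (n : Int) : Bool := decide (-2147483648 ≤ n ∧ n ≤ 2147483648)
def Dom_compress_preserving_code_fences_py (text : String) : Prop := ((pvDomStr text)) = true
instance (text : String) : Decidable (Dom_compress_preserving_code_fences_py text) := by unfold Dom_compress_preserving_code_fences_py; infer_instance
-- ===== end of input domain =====

-- B replaces A's split/enumerate-parity/join pipeline with one forward scan toggling an in_code flag (alternative decomposition, same cost).
-- ===== PORT A =====
def pvPlain (cs : List Char) : List Char := PySem.Chars.join [' '] (PySem.Chars.split₀ cs)

def compress_preserving_code_fences_py (text : String) : String :=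
  let chunks := PySem.Chars.splitOn text.toList ['`', '`', '`']
  if chunks.length = 1 then String.ofList (pvPlain text.toList)
  else
    let rebuilt := (PySem.List.enumerate chunks).map
      (fun p => if PySem.Int.mod p.1 2 = 0 then pvPlain p.2 else PySem.Chars.stripChars p.2 ['\n'])
    String.ofList (PySem.Chars.strip (PySem.Chars.join ['`', '`', '`'] rebuilt))

-- ===== PORT B =====
def pvProc (inCode : Bool) (seg : List Char) : List Char :=
  if inCode then PySem.Chars.stripChars seg ['\n'] else pvPlain seg

def pvScan (s : List Char) (inCode : Bool) (seg : List Char) : List Char :=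
  match s with
  | [] => pvProc inCode seg
  | c :: rest =>
    if ['`', '`', '`'].isPrefixOf (c :: rest) then
      pvProc inCode seg ++ ['`', '`', '`'] ++ pvScan (rest.drop 2) (!inCode) []
    else pvScan rest inCode (seg ++ [c])
termination_by s.length
decreasing_by
  all_goals simp

def compress_preserving_code_fences_py_alt (text : String) : String :=
  String.ofList (PySem.Chars.strip (pvScan text.toList false []))

-- ===== PRECONDITION & SPEC =====
def Spec_compress_preserving_code_fences_py (text : String) (out : String) : Prop := out = compress_preserving_code_fences_py_alt text
instance (text : String) (out : String) : Decidable (Spec_compress_preserving_code_fences_py text out) := by unfold Spec_compress_preserving_code_fences_py; infer_instance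

-- ===== CLAIM (what is proved, stated in full; the proofs are below) =====
def Claim_equal_compress_preserving_code_fences_py : Prop := ∀ (text : String), Dom_compress_preserving_code_fences_py text → Spec_compress_preserving_code_fences_py text (compress_preserving_code_fences_py text)

-- ===== LEMMAS AND PROOFS =====

-- proof-only: the compressed/joined form of a chunk list starting at parity inCode
def pvJoinP (inCode : Bool) : List (List Char) → List Char
  | [] => []
  | [c] => pvProc inCode c
  | c :: c' :: cs => pvProc inCode c ++ ['`', '`', '`'] ++ pvJoinP (!inCode) (c' :: cs)

theorem go_acc (f : Nat) (sep : List Char) : ∀ (l cur : List Char) (acc : List (List Char)),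
    PySem.Chars.splitOn.go sep f l cur acc = acc.reverse ++ PySem.Chars.splitOn.go sep f l cur [] := by
  induction f with
  | zero => intro l cur acc; simp [PySem.Chars.splitOn.go]
  | succ f ih =>
    intro l cur acc
    cases l with
    | nil => simp [PySem.Chars.splitOn.go]
    | cons c rest =>
      rw [PySem.Chars.splitOn.go]
      conv_rhs => rw [PySem.Chars.splitOn.go]
      split_ifs with h
      · rw [ih _ [] (cur.reverse :: acc), ih _ [] [cur.reverse]]
        simp
      · rw [ih rest (c :: cur) acc]

theorem go_ne_nil (f : Nat) (sep : List Char) : ∀ (l cur : List Char),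
    PySem.Chars.splitOn.go sep f l cur [] ≠ [] := by
  induction f with
  | zero => intro l cur; simp [PySem.Chars.splitOn.go]
  | succ f ih =>
    intro l cur
    cases l with
    | nil => simp [PySem.Chars.splitOn.go]
    | cons c rest =>
      rw [PySem.Chars.splitOn.go]
      split_ifs with h
      · rw [go_acc]; simp
      · exact ih rest (c :: cur)

theorem go_single (sep : List Char) (f : Nat) : ∀ (l cur : List Char),
    (PySem.Chars.splitOn.go sep f l cur []).length = 1 →
    PySem.Chars.splitOn.go sep f l cur [] = [cur.reverse ++ l] := by
  induction f with
  | zero => intro l cur _; simp [PySem.Chars.splitOn.go]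
  | succ f ih =>
    intro l cur hlen
    cases l with
    | nil => simp [PySem.Chars.splitOn.go]
    | cons c rest =>
      rw [PySem.Chars.splitOn.go] at hlen ⊢
      split_ifs at hlen ⊢ with h
      · rw [go_acc] at hlen
        have hnn := go_ne_nil f sep (List.drop sep.length (c :: rest)) []
        rcases hg : PySem.Chars.splitOn.go sep f (List.drop sep.length (c :: rest)) [] [] with _ | ⟨x, xs⟩
        · exact absurd hg hnn
        · rw [hg] at hlen; simp at hlen
      · rw [ih rest (c :: cur) hlen]
        simp

theorem scan_eq (f : Nat) : ∀ (l seg : List Char) (inCode : Bool), l.length < f →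
    pvScan l inCode seg = pvJoinP inCode (PySem.Chars.splitOn.go ['`', '`', '`'] f l seg.reverse []) := by
  induction f with
  | zero => intro l seg inCode h; omega
  | succ f ih =>
    intro l seg inCode h
    cases l with
    | nil => simp [pvScan, PySem.Chars.splitOn.go, pvJoinP]
    | cons c rest =>
      rw [pvScan, PySem.Chars.splitOn.go]
      split_ifs with hp
      · rw [go_acc]
        have hne := go_ne_nil f ['`', '`', '`'] (List.drop (['`', '`', '`'].length) (c :: rest)) []
        have hdrop : List.drop (['`', '`', '`'].length) (c :: rest) = rest.drop 2 := by simp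
        rw [hdrop] at hne
        rcases hcs : PySem.Chars.splitOn.go ['`', '`', '`'] f (List.drop 2 rest) [] [] with _ | ⟨c', cs'⟩
        · exact absurd hcs hne
        · have hlen : (rest.drop 2).length < f := by
            simp at h ⊢; omega
          have hih := ih (rest.drop 2) [] (!inCode) hlen
          simp only [List.reverse_nil] at hih
          rw [hdrop, hcs, hih, hcs]
          simp [pvJoinP]
      · have hlen : rest.length < f := by simp at h; omega
        have hih := ih rest (seg ++ [c]) inCode hlen
        simp only [List.reverse_append, List.reverse_singleton, List.singleton_append] at hih
        rw [hih]

theorem pvProcIf (k : Int) (c : List Char) :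
    (if PySem.Int.mod k 2 = 0 then pvPlain c else PySem.Chars.stripChars c ['\n'])
      = pvProc (!decide (PySem.Int.mod k 2 = 0)) c := by
  by_cases h : PySem.Int.mod k 2 = 0
  · rw [if_pos h, decide_eq_true h]; simp [pvProc]
  · rw [if_neg h, decide_eq_false h]; simp [pvProc]

theorem jp_eq (cs : List (List Char)) : ∀ (k : Int), 0 ≤ k → cs ≠ [] →
    PySem.Chars.join ['`', '`', '`'] ((PySem.List.enumerate cs k).map
        (fun p => if PySem.Int.mod p.1 2 = 0 then pvPlain p.2 else PySem.Chars.stripChars p.2 ['\n']))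
      = pvJoinP (!(PySem.Int.mod k 2 = 0)) cs := by
  induction cs with
  | nil => intro k hk h; exact absurd rfl h
  | cons c cs ihc =>
    intro k hk _
    cases cs with
    | nil =>
      rw [PySem.List.enumerate_cons, PySem.List.enumerate_nil]
      simp only [List.map_cons, List.map_nil, PySem.Chars.join_singleton]
      rw [pvProcIf]
      rfl
    | cons c' cs' =>
      rw [PySem.List.enumerate_cons, List.map_cons]
      rcases hmap : (PySem.List.enumerate (c' :: cs') (k + 1)).map
          (fun p => if PySem.Int.mod p.1 2 = 0 then pvPlain p.2 else PySem.Chars.stripChars p.2 ['\n']) with _ | ⟨y, ys⟩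
      · simp [PySem.List.enumerate_cons] at hmap
      · rw [hmap, PySem.Chars.join_cons_cons, ← hmap, ihc (k + 1) (by omega) (by simp)]
        have hf : ∀ a : Int, PySem.Int.mod a 2 = a % 2 := by
          intro a; rw [PySem.Int.mod, Int.fmod_eq_emod]; simp
        have hmod : (!decide (PySem.Int.mod (k + 1) 2 = 0)) = !(!decide (PySem.Int.mod k 2 = 0)) := by
          rw [hf, hf]
          by_cases h : k % 2 = 0
          · have h1 : (k + 1) % 2 = 1 := by omega
            rw [h, h1]; decide
          · have h0 : k % 2 = 1 := by
              rcases Int.emod_two_eq_zero_or_one k with h' | h' <;> simp [h'] at h ⊢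
            have h1 : (k + 1) % 2 = 0 := by omega
            rw [h0, h1]; decide
        rw [hmod, pvJoinP, pvProcIf]

theorem split0_good : ∀ (l cur : List Char) (acc : List (List Char)),
    (∀ w ∈ acc, w ≠ [] ∧ ∀ ch ∈ w, PySem.Chars.isspace ch = false) →
    (cur ≠ [] → ∀ ch ∈ cur, PySem.Chars.isspace ch = false) →
    ∀ w ∈ PySem.Chars.split₀.go l cur acc, w ≠ [] ∧ ∀ ch ∈ w, PySem.Chars.isspace ch = false := by
  intro l
  induction l with
  | nil =>
    intro cur acc hacc hcur w hw
    rw [PySem.Chars.split₀.go] at hw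
    split_ifs at hw with h
    · simp at hw
      exact hacc w hw
    · simp at hw h
      rcases hw with hw | hw
      · exact hacc w hw
      · subst hw
        exact ⟨by simpa using h, fun ch hch => hcur h ch (by simpa using hch)⟩
  | cons c rest ih =>
    intro cur acc hacc hcur w hw
    rw [PySem.Chars.split₀.go] at hw
    split_ifs at hw with h1 h2
    · exact ih [] acc hacc (by simp) w hw
    · refine ih [] (cur.reverse :: acc) ?_ (by simp) w hw
      intro v hv
      simp at hv
      rcases hv with hv | hv
      · subst hv
        simp at h2
        exact ⟨by simpa using h2, fun ch hch => hcur h2 ch (by simpa using hch)⟩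
      · exact hacc v hv
    · refine ih (c :: cur) acc hacc ?_ w hw
      intro _ ch hch
      simp at hch
      rcases hch with hch | hch
      · subst hch; simpa using h1
      · exact hcur (by intro hc; subst hc; simp at hch) ch hch

theorem join_head (ws : List (List Char))
    (h : ∀ w ∈ ws, w ≠ [] ∧ ∀ ch ∈ w, PySem.Chars.isspace ch = false) (hne : ws ≠ []) :
    ∃ c t, PySem.Chars.join [' '] ws = c :: t ∧ PySem.Chars.isspace c = false := by
  cases ws with
  | nil => exact absurd rfl hne
  | cons w ws' =>
    rcases h w (by simp) with ⟨hw, hsp⟩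
    rcases w with _ | ⟨c0, w0⟩
    · exact absurd rfl hw
    · cases ws' with
      | nil => exact ⟨c0, w0, by simp [PySem.Chars.join_singleton], hsp c0 (by simp)⟩
      | cons q qs =>
        refine ⟨c0, w0 ++ [' '] ++ PySem.Chars.join [' '] (q :: qs), ?_, hsp c0 (by simp)⟩
        rw [PySem.Chars.join_cons_cons]
        simp

theorem join_last (ws : List (List Char))
    (h : ∀ w ∈ ws, w ≠ [] ∧ ∀ ch ∈ w, PySem.Chars.isspace ch = false) (hne : ws ≠ []) :
    ∃ t c, PySem.Chars.join [' '] ws = t ++ [c] ∧ PySem.Chars.isspace c = false := by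
  induction ws with
  | nil => exact absurd rfl hne
  | cons w ws' ih =>
    cases ws' with
    | nil =>
      rcases h w (by simp) with ⟨hw, hsp⟩
      rcases (List.eq_nil_or_concat w) with hc | ⟨t, c, hc⟩
      · exact absurd hc hw
      · exact ⟨t, c, by simp [PySem.Chars.join_singleton, hc], hsp c (by simp [hc])⟩
    | cons q qs =>
      rcases ih (fun v hv => h v (List.mem_cons_of_mem _ hv)) (by simp) with ⟨t, c, ht, hcs⟩
      refine ⟨w ++ [' '] ++ t, c, ?_, hcs⟩
      rw [PySem.Chars.join_cons_cons, ht]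
      simp

theorem join_good (ws : List (List Char))
    (h : ∀ w ∈ ws, w ≠ [] ∧ ∀ ch ∈ w, PySem.Chars.isspace ch = false) :
    PySem.Chars.strip (PySem.Chars.join [' '] ws) = PySem.Chars.join [' '] ws := by
  cases ws with
  | nil => simp [PySem.Chars.join_nil, PySem.Chars.strip, PySem.Chars.lstrip, PySem.Chars.rstrip]
  | cons w ws' =>
    rcases join_head (w :: ws') h (by simp) with ⟨c, t, hht, hcns⟩
    rcases join_last (w :: ws') h (by simp) with ⟨t', c', hlt, hcns'⟩
    rw [PySem.Chars.strip, PySem.Chars.lstrip, hht, List.dropWhile_cons_of_neg (by simp [hcns]), ← hht, hlt,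
      PySem.Chars.rstrip]
    simp [List.dropWhile_cons_of_neg, hcns']

theorem strip_plain (l : List Char) : PySem.Chars.strip (pvPlain l) = pvPlain l := by
  unfold pvPlain
  apply join_good
  intro w hw
  have hgo : PySem.Chars.split₀ l = PySem.Chars.split₀.go l [] [] := rfl
  exact split0_good l [] [] (by simp) (fun h => absurd rfl h) w (hgo ▸ hw)

theorem compress_preserving_code_fences_py_spec : Claim_equal_compress_preserving_code_fences_py := by
  intro text _
  unfold Spec_compress_preserving_code_fences_py compress_preserving_code_fences_py compress_preserving_code_fences_py_alt
  have hsplit : PySem.Chars.splitOn text.toList ['`', '`', '`'] =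
      PySem.Chars.splitOn.go ['`', '`', '`'] (text.toList.length + 1) text.toList [] [] := rfl
  have hscan : pvScan text.toList false [] =
      pvJoinP false (PySem.Chars.splitOn text.toList ['`', '`', '`']) := by
    rw [hsplit]
    have := scan_eq (text.toList.length + 1) text.toList [] false (by omega)
    simpa using this
  by_cases hlen : (PySem.Chars.splitOn text.toList ['`', '`', '`']).length = 1
  · have h1 : PySem.Chars.splitOn text.toList ['`', '`', '`'] = [text.toList] := by
      rw [hsplit] at hlen ⊢
      simpa using go_single ['`', '`', '`'] (text.toList.length + 1) text.toList [] hlen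
    rw [hscan, h1]
    have hj : pvJoinP false [text.toList] = pvPlain text.toList := by simp [pvJoinP, pvProc]
    rw [hj, strip_plain]
    simp
  · rw [if_neg hlen, hscan]
    have hne : PySem.Chars.splitOn text.toList ['`', '`', '`'] ≠ [] := by
      rw [hsplit]; exact go_ne_nil _ _ _ _
    have := jp_eq (PySem.Chars.splitOn text.toList ['`', '`', '`']) 0 (by omega) hne
    have hm0 : PySem.Int.mod (0 : Int) 2 = 0 := by simp [PySem.Int.mod]
    rw [hm0] at this
    simp only [decide_true, Bool.not_true] at this
    simp only [this]
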